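-- pv_equiv track=rewrite | github.com/michellqueiroz-ua/instance-generator | python_script/stops_locations.py | check_adj_nodes
-- ===== SOURCE A (Python) =====
-- def check_adj_nodes(dimensionsu, dimensionsv):
--
--     for i in range(5):
--         if abs(dimensionsu[i] - dimensionsv[i]) == 1:
--             for k in range(5):
--                 if i != k:
--                     if dimensionsu[k] == dimensionsv[k]:
--                         return True
--
--     return False
-- ===== SOURCE B (Python) =====
-- def check_adj_nodes(dimensionsu, dimensionsv):
--     # Single recursive pass carrying two flags: has some dimension differed by 1,
--     # has some dimension matched. Returns as soon as both flags are set.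
--     # Correct vs A's 'k != i' guard because a matching index never differs by 1.
--     def go(i, adj, eq):
--         if adj and eq:
--             return True
--         if i == 5:
--             return False
--         d = dimensionsu[i] - dimensionsv[i]
--         return go(i + 1, adj or abs(d) == 1, eq or d == 0)
--     return go(0, False, False)
-- ===== Notes on version B (the rewrite author's own statement) =====
-- stated objective: simpler
-- what changed: Replaced the nested 5x5 scan with early return by a single left-to-right pass carrying two boolean flags (some dimension differs by 1, some dimension matches) that stops once both are set; the 'k != i' guard disappears because a matching index never differs by 1.
import Mathlib
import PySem

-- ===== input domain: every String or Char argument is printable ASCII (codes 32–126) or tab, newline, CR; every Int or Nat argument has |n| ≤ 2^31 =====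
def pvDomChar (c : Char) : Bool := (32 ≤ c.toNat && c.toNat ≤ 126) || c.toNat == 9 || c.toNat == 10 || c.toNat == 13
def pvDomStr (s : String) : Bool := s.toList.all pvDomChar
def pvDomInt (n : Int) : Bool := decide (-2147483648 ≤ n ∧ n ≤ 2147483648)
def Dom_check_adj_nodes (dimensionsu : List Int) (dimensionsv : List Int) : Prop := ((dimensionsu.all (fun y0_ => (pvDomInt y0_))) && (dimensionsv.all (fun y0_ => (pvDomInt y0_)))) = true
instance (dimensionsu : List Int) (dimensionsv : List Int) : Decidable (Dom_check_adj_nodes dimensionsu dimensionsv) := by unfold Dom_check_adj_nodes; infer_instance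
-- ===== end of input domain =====

-- B replaces A's nested 5x5 scan by a single pass carrying two flags (some dimension differs by 1,
-- some dimension matches) with early exit; simpler, and correct because a matching index is never
-- the adjacent index. Equivalence of RETURN values on inputs where A raises no IndexError.

-- ===== PORT A =====
-- nested for-loops with early 'return True' become nested List.any over range 5;
-- dimensionsu[i] with Pre_-guaranteed in-range nonnegative index is List.getD.
def check_adj_nodes (dimensionsu : List Int) (dimensionsv : List Int) : Bool :=
  (List.range 5).any (fun i =>
    ((dimensionsu.getD i 0 - dimensionsv.getD i 0).natAbs == 1) &&
    (List.range 5).any (fun k =>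
      decide (i ≠ k) && (dimensionsu.getD k 0 == dimensionsv.getD k 0)))

-- ===== PORT B =====
-- Source B's inner recursion go(i, adj, eq): fuel n = 5 - i makes the recursion structural;
-- at n = 0 (i = 5) Python's two checks collapse to 'adj && eq'.
def check_adj_nodes_go (dimensionsu : List Int) (dimensionsv : List Int) :
    Nat → Nat → Bool → Bool → Bool
  | _, 0, adj, eq => adj && eq
  | i, n + 1, adj, eq =>
    if adj && eq then true
    else
      check_adj_nodes_go dimensionsu dimensionsv (i + 1) n
        (adj || ((dimensionsu.getD i 0 - dimensionsv.getD i 0).natAbs == 1))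
        (eq || (dimensionsu.getD i 0 - dimensionsv.getD i 0 == 0))

def check_adj_nodes_alt (dimensionsu : List Int) (dimensionsv : List Int) : Bool :=
  check_adj_nodes_go dimensionsu dimensionsv 0 5 false false

-- ===== PRECONDITION & SPEC =====
-- Python A indexes both lists at 0..4; on shorter lists it raises IndexError unless an early
-- 'return True' fires first, which happens exactly when some in-range index is adjacent and some
-- in-range index is equal. Pre_ admits exactly the inputs on which A returns normally.
def Pre_check_adj_nodes (dimensionsu : List Int) (dimensionsv : List Int) : Prop :=
  (5 ≤ dimensionsu.length ∧ 5 ≤ dimensionsv.length) ∨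
  ((∃ i < min dimensionsu.length dimensionsv.length,
      (dimensionsu.getD i 0 - dimensionsv.getD i 0).natAbs = 1) ∧
   (∃ k < min dimensionsu.length dimensionsv.length,
      dimensionsu.getD k 0 = dimensionsv.getD k 0))
instance (dimensionsu : List Int) (dimensionsv : List Int) : Decidable (Pre_check_adj_nodes dimensionsu dimensionsv) := by unfold Pre_check_adj_nodes; infer_instance
def pvWitness_check_adj_nodes : List Int × List Int := ([0, 1, 2, 3, 4], [1, 1, 5, 3, 9])
def Spec_check_adj_nodes (dimensionsu : List Int) (dimensionsv : List Int) (out : Bool) : Prop := out = check_adj_nodes_alt dimensionsu dimensionsv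
instance (dimensionsu : List Int) (dimensionsv : List Int) (out : Bool) : Decidable (Spec_check_adj_nodes dimensionsu dimensionsv out) := by unfold Spec_check_adj_nodes; infer_instance

-- ===== CLAIM (what is proved, stated in full; the proofs are below) =====
def Claim_equal_check_adj_nodes : Prop := ∀ (dimensionsu : List Int) (dimensionsv : List Int), Dom_check_adj_nodes dimensionsu dimensionsv → Pre_check_adj_nodes dimensionsu dimensionsv → Spec_check_adj_nodes dimensionsu dimensionsv (check_adj_nodes dimensionsu dimensionsv)

-- ===== LEMMAS AND PROOFS =====

-- the flag-carrying loop computes the disjunction of each flag with its flat scan over range' i n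
theorem check_adj_nodes_go_eq (u v : List Int) (n : Nat) :
    ∀ (i : Nat) (adj eq : Bool),
      check_adj_nodes_go u v i n adj eq =
        ((adj || (List.range' i n).any (fun j => (u.getD j 0 - v.getD j 0).natAbs == 1)) &&
         (eq || (List.range' i n).any (fun j => u.getD j 0 - v.getD j 0 == 0))) := by
  induction n with
  | zero => intro i adj eq; simp [check_adj_nodes_go]
  | succ n ih =>
    intro i adj eq
    rw [check_adj_nodes_go]
    by_cases h : adj && eq
    · rw [if_pos h]
      rcases Bool.and_eq_true _ _ |>.mp h with ⟨ha, he⟩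
      simp [ha, he]
    · rw [if_neg h, ih, List.range'_succ]
      simp [Bool.or_assoc]

theorem check_adj_nodes_spec : Claim_equal_check_adj_nodes := by
  intro u v _ _
  unfold Spec_check_adj_nodes check_adj_nodes check_adj_nodes_alt
  rw [check_adj_nodes_go_eq, Bool.eq_iff_iff]
  have hr : List.range' 0 5 = List.range 5 := List.range_eq_range'.symm
  rw [hr]
  simp only [List.any_eq_true, List.mem_range, Bool.and_eq_true, Bool.false_or,
    decide_eq_true_eq, beq_iff_eq]
  constructor
  · rintro ⟨i, hi, h1, k, hk, _, h2⟩
    exact ⟨⟨i, hi, h1⟩, ⟨k, hk, by omega⟩⟩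
  · rintro ⟨⟨i, hi, h1⟩, ⟨k, hk, h2⟩⟩
    refine ⟨i, hi, h1, k, hk, ?_, by omega⟩
    intro hik
    subst hik
    omega
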